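-- pv_equiv track=rewrite | github.com/Ambreghisalberti/UTime | UTime/GradientBoosting/__init__.py | get_all_feature_choices
-- ===== SOURCE A (Python) =====
-- def get_all_feature_choices(features_yes_or_no, features_multiple_choice):
--     all_combinaisons = [[]]
--     for _ in features_yes_or_no:
--         all_combinaisons = ([comb + [0] for comb in all_combinaisons] +
--                             [comb + [1] for comb in all_combinaisons])
--
--     for choices in features_multiple_choice:
--         nb_choices = len(choices)
--         all_new_combinaisons = []
--         for i in range(nb_choices):
--             all_new_combinaisons += [comb + [i] for comb in all_combinaisons]
--         all_combinaisons = all_new_combinaisons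
--
--     return all_combinaisons
-- ===== SOURCE B (Python) =====
-- def get_all_feature_choices(features_yes_or_no, features_multiple_choice):
--     # Mixed-radix counter: feature 0 is the least-significant digit.
--     radices = [2] * len(features_yes_or_no) + [len(c) for c in features_multiple_choice]
--     total = 1
--     for r in radices:
--         total *= r
--     result = []
--     for n in range(total):
--         row = []
--         x = n
--         for r in radices:
--             row.append(x % r)
--             x //= r
--         result.append(row)
--     return result
-- ===== Notes on version B (the rewrite author's own statement) =====
-- stated objective: alternative
-- what changed: Replaces A's repeated rebuilding of the whole combination list (one pass per feature, each copying every partial row) by a single mixed-radix counter: total = product of radices and row n is the digit expansion of n with feature 0 as the least-significant digit.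
import Mathlib
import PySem

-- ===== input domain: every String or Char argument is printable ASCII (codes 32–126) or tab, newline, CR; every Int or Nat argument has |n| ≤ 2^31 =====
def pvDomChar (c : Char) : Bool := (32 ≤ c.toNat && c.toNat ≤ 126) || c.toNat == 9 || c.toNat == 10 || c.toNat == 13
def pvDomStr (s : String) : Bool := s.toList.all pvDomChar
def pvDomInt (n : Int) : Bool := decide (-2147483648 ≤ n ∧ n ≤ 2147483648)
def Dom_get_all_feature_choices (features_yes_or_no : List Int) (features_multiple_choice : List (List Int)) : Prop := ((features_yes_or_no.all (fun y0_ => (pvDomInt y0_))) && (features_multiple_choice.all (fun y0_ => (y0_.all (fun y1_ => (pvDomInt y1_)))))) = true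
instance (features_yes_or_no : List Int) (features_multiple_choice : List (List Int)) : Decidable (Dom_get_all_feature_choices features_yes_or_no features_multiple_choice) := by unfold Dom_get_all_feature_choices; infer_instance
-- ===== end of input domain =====

-- B replaces A's repeated list-rebuilding product loops by a single mixed-radix
-- counter (row j of the output is the digit expansion of j, feature 0 least
-- significant); objective: alternative algorithm, same output.

-- ===== PORT A =====
def get_all_feature_choices (features_yes_or_no : List Int) (features_multiple_choice : List (List Int)) : List (List Int) :=
  -- first loop: for _ in features_yes_or_no
  let all1 : List (List Int) := features_yes_or_no.foldl
    (fun all_combinaisons _ =>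
      all_combinaisons.map (fun comb => comb ++ [(0 : Int)]) ++
      all_combinaisons.map (fun comb => comb ++ [(1 : Int)])) [[]]
  -- second loop: for choices in features_multiple_choice, inner loop over range(nb_choices)
  features_multiple_choice.foldl
    (fun all_combinaisons choices =>
      (PySem.List.pyRange 0 (choices.length : Int) 1).foldl
        (fun all_new_combinaisons i =>
          all_new_combinaisons ++ all_combinaisons.map (fun comb => comb ++ [i])) [])
    all1

-- ===== PORT B =====
-- inner loop of Source B: row = []; x = n; for r in radices: row.append(x % r); x //= r
def pvRowB (radices : List Int) (n : Int) : List Int :=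
  (radices.foldl
    (fun (st : List Int × Int) r =>
      (st.1 ++ [PySem.Int.mod st.2 r], PySem.Int.floordiv st.2 r)) ([], n)).1

def get_all_feature_choices_alt (features_yes_or_no : List Int) (features_multiple_choice : List (List Int)) : List (List Int) :=
  let radices : List Int :=
    List.replicate features_yes_or_no.length (2 : Int) ++
      features_multiple_choice.map (fun c => (c.length : Int))
  let total : Int := radices.foldl (fun t r => t * r) 1
  (PySem.List.pyRange 0 total 1).map (fun n => pvRowB radices n)

-- ===== PRECONDITION & SPEC =====
def Spec_get_all_feature_choices (features_yes_or_no : List Int) (features_multiple_choice : List (List Int)) (out : List (List Int)) : Prop := out = get_all_feature_choices_alt features_yes_or_no features_multiple_choice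
instance (features_yes_or_no : List Int) (features_multiple_choice : List (List Int)) (out : List (List Int)) : Decidable (Spec_get_all_feature_choices features_yes_or_no features_multiple_choice out) := by unfold Spec_get_all_feature_choices; infer_instance

-- ===== CLAIM (what is proved, stated in full; the proofs are below) =====
def Claim_equal_get_all_feature_choices : Prop := ∀ (features_yes_or_no : List Int) (features_multiple_choice : List (List Int)), Dom_get_all_feature_choices features_yes_or_no features_multiple_choice → Spec_get_all_feature_choices features_yes_or_no features_multiple_choice (get_all_feature_choices features_yes_or_no features_multiple_choice)

-- ===== LEMMAS AND PROOFS =====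

-- Nat-level abstract step: extend every row of acc with each of the r choices.
def pvStepN (acc : List (List Nat)) (r : Nat) : List (List Nat) :=
  (List.range r).flatMap (fun i => acc.map (fun c => c ++ [i]))

-- Nat-level mixed-radix digits, least significant first.
def pvDigitsN : List Nat → Nat → List Nat
  | [], _ => []
  | r :: rs, n => (n % r) :: pvDigitsN rs (n / r)

def pvCastRow (c : List Nat) : List Int := c.map (fun (k : Nat) => (k : Int))

theorem pvDigitsN_shift (rs : List Nat) (m i : Nat) :
    pvDigitsN rs (m + i * rs.prod) = pvDigitsN rs m := by
  induction rs generalizing m i with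
  | nil => simp [pvDigitsN]
  | cons r rs ih =>
    rcases Nat.eq_zero_or_pos r with hr | hr
    · simp [hr]
    · have h1 : m + i * (r :: rs).prod = m + (i * rs.prod) * r := by
        simp [List.prod_cons]; ring
      rw [h1, pvDigitsN, pvDigitsN, Nat.add_mul_mod_self_right,
        Nat.add_mul_div_right _ _ hr, ih]

theorem pvDigitsN_snoc (rs : List Nat) (r : Nat) (n : Nat) :
    pvDigitsN (rs ++ [r]) n = pvDigitsN rs n ++ [(n / rs.prod) % r] := by
  induction rs generalizing n with
  | nil => simp [pvDigitsN]
  | cons r0 rs ih =>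
    simp only [List.cons_append, pvDigitsN, ih, List.prod_cons,
      Nat.div_div_eq_div_mul, List.cons_append]

theorem pvRange_mul (P r : Nat) :
    List.range (P * r) =
      (List.range r).flatMap (fun i => (List.range P).map (fun m => m + i * P)) := by
  induction r with
  | zero => simp
  | succ r ih =>
    have h : P * (r + 1) = P * r + P := by ring
    rw [h, List.range_add, ih, List.range_succ, List.flatMap_append]
    simp [Nat.add_comm, Nat.mul_comm]

theorem pvFlatMap_congr {α β : Type} (l : List α) (f g : α → List β)
    (h : ∀ a ∈ l, f a = g a) : l.flatMap f = l.flatMap g := by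
  induction l with
  | nil => rfl
  | cons a l ih =>
    simp only [List.flatMap_cons, h a (List.mem_cons_self),
      ih (fun a ha => h a (List.mem_cons_of_mem _ ha))]

theorem pvMain (rads : List Nat) :
    List.foldl pvStepN [[]] rads = (List.range rads.prod).map (pvDigitsN rads) := by
  induction rads using List.reverseRecOn with
  | nil => simp [pvDigitsN]
  | append_singleton rs r ih =>
    rw [List.foldl_append, List.foldl_cons, List.foldl_nil, ih]
    have hprod : (rs ++ [r]).prod = rs.prod * r := by simp
    rw [hprod, pvRange_mul, List.map_flatMap]
    unfold pvStepN
    apply pvFlatMap_congr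
    intro i hi
    rw [List.map_map, List.map_map]
    apply List.map_congr_left
    intro m hm
    simp only [Function.comp_apply]
    have hm' : m < rs.prod := List.mem_range.mp hm
    have hP : 0 < rs.prod := Nat.pos_of_ne_zero (by omega)
    rw [pvDigitsN_snoc, pvDigitsN_shift]
    have hdiv : (m + i * rs.prod) / rs.prod = i := by
      rw [Nat.add_mul_div_right _ _ hP, Nat.div_eq_of_lt hm', Nat.zero_add]
    rw [hdiv, Nat.mod_eq_of_lt (List.mem_range.mp hi)]

-- A's first loop over the yes/no features is pvStepN with radix 2, cast to Int.
theorem pvBridgeYes (ys : List Int) (accN : List (List Nat)) :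
    ys.foldl
      (fun all_combinaisons _ =>
        all_combinaisons.map (fun comb => comb ++ [(0 : Int)]) ++
        all_combinaisons.map (fun comb => comb ++ [(1 : Int)]))
      (accN.map pvCastRow)
    = (List.foldl pvStepN accN (List.replicate ys.length 2)).map pvCastRow := by
  induction ys generalizing accN with
  | nil => simp
  | cons y ys ih =>
    rw [List.foldl_cons, List.length_cons, List.replicate_succ, List.foldl_cons]
    rw [← ih (pvStepN accN 2)]
    congr 1
    show _ = (pvStepN accN 2).map pvCastRow
    have h2 : List.range 2 = [0, 1] := by decide
    simp [pvStepN, h2, pvCastRow, List.map_map, Function.comp_def]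

-- an accumulating "+=" loop is init ++ a flatMap
theorem pvFoldlAppend {α β : Type} (l : List α) (f : α → List β) (init : List β) :
    l.foldl (fun a x => a ++ f x) init = init ++ l.flatMap f := by
  induction l generalizing init with
  | nil => simp
  | cons a l ih => rw [List.foldl_cons, ih, List.flatMap_cons, List.append_assoc]

-- the inner "all_new_combinaisons += …" loop, as init ++ a flatMap
theorem pvInnerLoop (L : Nat) (acc : List (List Int)) (init : List (List Int)) :
    (PySem.List.pyRange 0 (L : Int) 1).foldl
      (fun all_new i => all_new ++ acc.map (fun comb => comb ++ [i])) init
    = init ++ (List.range L).flatMap (fun (k : Nat) => acc.map (fun comb => comb ++ [(k : Int)])) := by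
  have hr : PySem.List.pyRange 0 (L : Int) 1
      = (List.range L).map (fun (k : Nat) => (k : Int)) := by
    rw [PySem.List.pyRange_one]
    simp
  rw [hr, List.foldl_map, pvFoldlAppend]

-- A's second loop over the multiple-choice features is pvStepN with radix len(choices).
theorem pvBridgeMulti (ms : List (List Int)) (accN : List (List Nat)) :
    ms.foldl
      (fun all_combinaisons choices =>
        (PySem.List.pyRange 0 (choices.length : Int) 1).foldl
          (fun all_new i => all_new ++ all_combinaisons.map (fun comb => comb ++ [i])) [])
      (accN.map pvCastRow)
    = (List.foldl pvStepN accN (ms.map List.length)).map pvCastRow := by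
  induction ms generalizing accN with
  | nil => simp
  | cons c ms ih =>
    rw [List.foldl_cons, List.map_cons, List.foldl_cons, pvInnerLoop, List.nil_append,
      ← ih (pvStepN accN c.length)]
    congr 1
    show _ = (pvStepN accN c.length).map pvCastRow
    simp [pvStepN, pvCastRow, List.map_flatMap, List.map_map, Function.comp_def]

-- Source B's digit loop computes the cast of pvDigitsN (mod/floordiv agree with Nat % and /).
theorem pvRowB_eq (rads : List Nat) (n : Nat) (acc : List Int) :
    (rads.map (fun (r : Nat) => (r : Int))).foldl
      (fun (st : List Int × Int) r =>
        (st.1 ++ [PySem.Int.mod st.2 r], PySem.Int.floordiv st.2 r)) (acc, (n : Int))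
    = (acc ++ pvCastRow (pvDigitsN rads n), ((n / rads.prod : Nat) : Int)) := by
  induction rads generalizing n acc with
  | nil => simp [pvCastRow, pvDigitsN]
  | cons r rs ih =>
    rw [List.map_cons, List.foldl_cons, PySem.Int.mod_natCast, PySem.Int.floordiv_natCast,
      ih (n / r) (acc ++ [((n % r : Nat) : Int)])]
    simp [pvCastRow, pvDigitsN, Nat.div_div_eq_div_mul]

-- cast of the total product
theorem pvTotal_eq (l : List Nat) (t : Nat) :
    (l.map (fun (r : Nat) => (r : Int))).foldl (fun a b => a * b) (t : Int)
      = ((l.foldl (· * ·) t : Nat) : Int) := by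
  induction l generalizing t with
  | nil => simp
  | cons r rs ih => rw [List.map_cons, List.foldl_cons, List.foldl_cons, ← Nat.cast_mul, ih]

-- ===== VERDICT (by name: the statement is the Claim_ definition above) =====
theorem get_all_feature_choices_spec : Claim_equal_get_all_feature_choices := by
  intro ys ms _
  unfold Spec_get_all_feature_choices get_all_feature_choices get_all_feature_choices_alt
  set radsN : List Nat := List.replicate ys.length 2 ++ ms.map List.length with hradsN
  have hmapcast : List.replicate ys.length (2 : Int) ++ ms.map (fun c => (c.length : Int))
      = radsN.map (fun (r : Nat) => (r : Int)) := by
    simp [hradsN, List.map_map, Function.comp_def]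
  -- A's side
  have hA :
      ms.foldl
        (fun all_combinaisons choices =>
          (PySem.List.pyRange 0 (choices.length : Int) 1).foldl
            (fun all_new i => all_new ++ all_combinaisons.map (fun comb => comb ++ [i])) [])
        (ys.foldl
          (fun all_combinaisons _ =>
            all_combinaisons.map (fun comb => comb ++ [(0 : Int)]) ++
            all_combinaisons.map (fun comb => comb ++ [(1 : Int)])) [[]])
      = ((List.range radsN.prod).map (pvDigitsN radsN)).map pvCastRow := by
    have h0 : ([[]] : List (List Int)) = ([[]] : List (List Nat)).map pvCastRow := by
      simp [pvCastRow]
    rw [h0, pvBridgeYes, pvBridgeMulti, ← List.foldl_append, ← hradsN, pvMain]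
  -- B's side
  have htot : (radsN.map (fun (r : Nat) => (r : Int))).foldl (fun t r => t * r) (1 : Int)
      = ((radsN.prod : Nat) : Int) := by
    rw [show ((1 : Int)) = ((1 : Nat) : Int) by simp, pvTotal_eq]
    rw [← List.prod_eq_foldl]
  have hrange : PySem.List.pyRange 0 ((radsN.prod : Nat) : Int) 1
      = (List.range radsN.prod).map (fun (k : Nat) => (k : Int)) := by
    rw [PySem.List.pyRange_one]
    simp only [Int.sub_zero, Int.toNat_natCast]
    simp
  rw [hA]
  simp only [hmapcast, htot, hrange, List.map_map]
  apply List.map_congr_left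
  intro n _
  simp only [Function.comp_apply]
  unfold pvRowB
  rw [pvRowB_eq radsN n []]
  simp [pvCastRow]
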